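-- pv_equiv track=rewrite | github.com/mrsimonsen/SimoGrader | diff.py | splitter
-- ===== SOURCE A (Python) =====
-- def splitter(thing):
-- 	lines = []
-- 	temp = ''
-- 	for i in thing:
-- 		temp += i
-- 		if i == '\n':
-- 			lines.append(temp)
-- 			temp = ''
-- 	if len(lines)<1:
-- 		lines.append(temp)
-- 	return lines
-- ===== SOURCE B (Python) =====
-- def splitter(thing):
--     parts = thing.split('\n')
--     lines = [p + '\n' for p in parts[:-1]]
--     return lines if lines else [thing]
-- ===== Notes on version B (the rewrite author's own statement) =====
-- stated objective: idiomatic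
-- what changed: Replaces the character-by-character accumulator loop with str.split on the newline separator followed by reattaching the separator to every piece but the last (whose trailing fragment A silently drops too); the no-newline case falls out as the whole string.
import Mathlib
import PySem

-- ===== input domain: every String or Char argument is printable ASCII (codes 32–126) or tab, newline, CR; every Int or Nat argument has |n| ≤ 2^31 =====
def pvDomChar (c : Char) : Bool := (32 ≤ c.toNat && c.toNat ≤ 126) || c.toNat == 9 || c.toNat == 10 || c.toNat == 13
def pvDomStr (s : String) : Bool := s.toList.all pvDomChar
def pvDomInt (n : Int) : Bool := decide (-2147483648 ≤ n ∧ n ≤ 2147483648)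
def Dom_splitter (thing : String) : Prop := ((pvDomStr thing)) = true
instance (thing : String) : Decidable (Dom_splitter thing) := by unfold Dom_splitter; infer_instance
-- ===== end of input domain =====

-- B replaces A's character-by-character accumulator loop by split('\n') + reattaching
-- the newline to every piece but the last (idiomatic; same values everywhere).

-- ===== PORT A =====
-- A's loop body: state is (lines, temp); 'temp += i' appends a char (temp kept as List Char)
def splitterStep (st : List String × List Char) (i : Char) : List String × List Char :=
  let temp := st.2 ++ [i]
  if i = '\n' then (st.1 ++ [String.ofList temp], []) else (st.1, temp)

def splitter (thing : String) : List String :=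
  let st := thing.toList.foldl splitterStep ([], [])
  if st.1.length < 1 then st.1 ++ [String.ofList st.2] else st.1

-- ===== PORT B =====
-- thing.split('\n') on the char-list side (the sep "\n" is non-empty, so split = splitOn)
def splitter_alt (thing : String) : List String :=
  let parts := PySem.Chars.splitOn thing.toList ['\n']
  let lines := parts.dropLast.map (fun p => String.ofList (p ++ ['\n']))
  if lines.isEmpty then [thing] else lines

-- ===== PRECONDITION & SPEC =====
def Spec_splitter (thing : String) (out : List String) : Prop := out = splitter_alt thing
instance (thing : String) (out : List String) : Decidable (Spec_splitter thing out) := by unfold Spec_splitter; infer_instance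

-- ===== CLAIM (what is proved, stated in full; the proofs are below) =====
def Claim_equal_splitter : Prop := ∀ (thing : String), Dom_splitter thing → Spec_splitter thing (splitter thing)

-- ===== LEMMAS AND PROOFS =====

/-- Reference splitter on char lists: the list of '\n'-separated chunks
(newlines not included; always non-empty). -/
def mySplit : List Char → List (List Char)
  | [] => [[]]
  | c :: r => if c = '\n' then [] :: mySplit r else (mySplit r).modifyHead (c :: ·)

theorem mySplit_ne_nil (l : List Char) : mySplit l ≠ [] := by
  cases l with
  | nil => simp [mySplit]
  | cons c r =>
    simp only [mySplit]
    split_ifs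
    · simp
    · cases h : mySplit r with
      | nil => exact absurd h (mySplit_ne_nil r)
      | cons a t => simp

theorem mySplit_no_nl (l : List Char) (h : '\n' ∉ l) : mySplit l = [l] := by
  induction l with
  | nil => simp [mySplit]
  | cons c r ih =>
    simp only [List.mem_cons, not_or] at h
    simp [mySplit, Ne.symm h.1, ih h.2]

theorem mySplit_append_no_nl (cur l : List Char) (h : '\n' ∉ cur) :
    mySplit (cur ++ l) = (mySplit l).modifyHead (cur ++ ·) := by
  induction cur with
  | nil =>
    cases hl : mySplit l with
    | nil => exact absurd hl (mySplit_ne_nil l)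
    | cons a t => simp [hl]
  | cons c r ih =>
    simp only [List.mem_cons, not_or] at h
    cases hl : mySplit l with
    | nil => exact absurd hl (mySplit_ne_nil l)
    | cons a t =>
      have := ih h.2
      rw [hl] at this
      simp [mySplit, Ne.symm h.1, this]

/-- `splitOn.go` with enough fuel computes `mySplit` (sep = ['\n']). -/
theorem splitOn_go_eq (l : List Char) : ∀ (fuel : Nat), l.length ≤ fuel →
    ∀ (cur : List Char) (acc : List (List Char)),
    PySem.Chars.splitOn.go ['\n'] fuel l cur acc
      = acc.reverse ++ (mySplit l).modifyHead (cur.reverse ++ ·) := by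
  induction l with
  | nil =>
    intro fuel _ cur acc
    cases fuel <;> simp [PySem.Chars.splitOn.go, mySplit]
  | cons c r ih =>
    intro fuel hfuel cur acc
    cases fuel with
    | zero => simp at hfuel
    | succ f =>
      rw [show PySem.Chars.splitOn.go ['\n'] (f+1) (c::r) cur acc
            = if List.isPrefixOf ['\n'] (c::r) = true then
                PySem.Chars.splitOn.go ['\n'] f (List.drop (['\n'].length) (c::r)) []
                  (cur.reverse :: acc)
              else PySem.Chars.splitOn.go ['\n'] f r (c::cur) acc from rfl]
      simp only [List.length_cons, Nat.succ_le_succ_iff] at hfuel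
      by_cases hc : c = '\n'
      · subst hc
        have hpre : List.isPrefixOf ['\n'] ('\n' :: r) = true := by
          simp [List.isPrefixOf]
        rw [if_pos hpre]
        have hd : List.drop (['\n'].length) ('\n' :: r) = r := by simp
        rw [hd, ih f hfuel [] (cur.reverse :: acc)]
        cases hr : mySplit r with
        | nil => exact absurd hr (mySplit_ne_nil r)
        | cons a t => simp [mySplit, hr]
      · have hpre : List.isPrefixOf ['\n'] (c :: r) = false := by
          simp only [List.isPrefixOf, Bool.and_true, beq_eq_false_iff_ne, ne_eq]
          exact fun e => hc e.symm
        rw [if_neg (by simp [hpre]), ih f hfuel (c :: cur) acc]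
        cases hr : mySplit r with
        | nil => exact absurd hr (mySplit_ne_nil r)
        | cons a t => simp [mySplit, hc, hr]

theorem splitOn_eq (l : List Char) :
    PySem.Chars.splitOn l ['\n'] = mySplit l := by
  rw [PySem.Chars.splitOn, splitOn_go_eq l (l.length + 1) (by omega) [] []]
  cases h : mySplit l with
  | nil => exact absurd h (mySplit_ne_nil l)
  | cons a t => simp

/-- the lines A's loop appends, starting from buffer `cur` -/
def linesOf : List Char → List Char → List String
  | _, [] => []
  | cur, c :: r =>
    if c = '\n' then String.ofList (cur ++ [c]) :: linesOf [] r
    else linesOf (cur ++ [c]) r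

/-- the leftover buffer of A's loop -/
def tempOf : List Char → List Char → List Char
  | cur, [] => cur
  | cur, c :: r => if c = '\n' then tempOf [] r else tempOf (cur ++ [c]) r

theorem foldA (l : List Char) : ∀ (acc : List String) (cur : List Char),
    l.foldl splitterStep (acc, cur) = (acc ++ linesOf cur l, tempOf cur l) := by
  induction l with
  | nil => intro acc cur; simp [linesOf, tempOf]
  | cons c r ih =>
    intro acc cur
    rw [List.foldl_cons]
    by_cases hc : c = '\n'
    · subst hc
      have hstep : splitterStep (acc, cur) '\n'
          = (acc ++ [String.ofList (cur ++ ['\n'])], []) := by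
        simp [splitterStep]
      rw [hstep, ih]
      simp [linesOf, tempOf]
    · have hstep : splitterStep (acc, cur) c = (acc, cur ++ [c]) := by
        simp [splitterStep, hc]
      rw [hstep, ih]
      simp [linesOf, tempOf, hc]

theorem linesOf_eq (l : List Char) : ∀ (cur : List Char), '\n' ∉ cur →
    linesOf cur l
      = (mySplit (cur ++ l)).dropLast.map (fun p => String.ofList (p ++ ['\n'])) := by
  induction l with
  | nil =>
    intro cur h
    simp [linesOf, mySplit_no_nl cur h]
  | cons c r ih =>
    intro cur h
    by_cases hc : c = '\n'
    · subst hc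
      rw [mySplit_append_no_nl cur ('\n' :: r) h]
      cases hr : mySplit r with
      | nil => exact absurd hr (mySplit_ne_nil r)
      | cons a t =>
        simp [linesOf, mySplit, hr, ih [] (by simp)]
    · have h2 : '\n' ∉ cur ++ [c] := by
        simp [h, Ne.symm hc]
      have := ih (cur ++ [c]) h2
      rw [List.append_assoc] at this
      simpa [linesOf, hc] using this

theorem tempOf_eq (l : List Char) : ∀ (cur : List Char), '\n' ∉ cur →
    tempOf cur l = (mySplit (cur ++ l)).getLastD [] := by
  induction l with
  | nil =>
    intro cur h
    simp [tempOf, mySplit_no_nl cur h]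
  | cons c r ih =>
    intro cur h
    by_cases hc : c = '\n'
    · subst hc
      rw [mySplit_append_no_nl cur ('\n' :: r) h]
      cases hr : mySplit r with
      | nil => exact absurd hr (mySplit_ne_nil r)
      | cons a t =>
        have := ih [] (by simp)
        simp only [List.nil_append] at this
        rw [hr] at this
        simp [tempOf, mySplit, hr, this]
    · have h2 : '\n' ∉ cur ++ [c] := by
        simp [h, Ne.symm hc]
      have := ih (cur ++ [c]) h2
      rw [List.append_assoc] at this
      simpa [tempOf, hc] using this

theorem mySplit_singleton_of_dropLast_nil (l : List Char)
    (h : (mySplit l).dropLast = []) : mySplit l = [l] := by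
  induction l with
  | nil => simp [mySplit]
  | cons c r ih =>
    by_cases hc : c = '\n'
    · subst hc
      simp only [mySplit, if_true] at h
      cases hr : mySplit r with
      | nil => exact absurd hr (mySplit_ne_nil r)
      | cons a t => rw [hr] at h; simp at h
    · simp only [mySplit, if_neg hc] at h ⊢
      cases hr : mySplit r with
      | nil => exact absurd hr (mySplit_ne_nil r)
      | cons a t =>
        rw [hr] at h
        cases t with
        | nil =>
          have : mySplit r = [r] := by
            apply ih; rw [hr]; simp
          rw [hr] at this
          simp_all
        | cons b t2 => simp at h

-- ===== VERDICT (by name: the statement is the Claim_ definition above) =====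
theorem splitter_spec : Claim_equal_splitter := by
  intro thing _
  unfold Spec_splitter splitter splitter_alt
  rw [foldA, splitOn_eq]
  simp only [List.nil_append]
  rw [linesOf_eq thing.toList [] (by simp), tempOf_eq thing.toList [] (by simp)]
  simp only [List.nil_append]
  by_cases h : (mySplit thing.toList).dropLast = []
  · have h1 := mySplit_singleton_of_dropLast_nil thing.toList h
    simp [h1]
  · have h2 : (mySplit thing.toList).length - 1 ≠ 0 := by
      intro e
      exact h (List.length_eq_zero_iff.mp (by rw [List.length_dropLast]; exact e))
    rw [if_neg (by simp only [List.length_map, List.length_dropLast]; omega),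
        if_neg (by simp only [List.isEmpty_iff, List.map_eq_nil_iff]; exact h)]
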